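-- pv_equiv track=rewrite | github.com/DeplanckeLab/meSMiLEseq | SMiLEseq/scripts/02_extract_significant_fastqs.py | choose_kmer
-- ===== SOURCE A (Python) =====
-- def choose_kmer(kmer_files):
--     'Selects the longest kmer (9mer) to filter fastqs.'
--     for i in kmer_files:
--         if '9mer' in i:
--             return i, '9mer'
--
--     for j in kmer_files:
--         if '8mer' in j:
--             return j, '8mer'
--
--     for k in kmer_files:
--         if '7mer' in k:
--             return k, '7mer'
--
--     for l in kmer_files:
--         if '6mer' in l:
--             return l, '6mer'
-- ===== SOURCE B (Python) =====
-- def choose_kmer(kmer_files):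
--     'Selects the longest kmer (9mer) to filter fastqs.'
--     markers = ['9mer', '8mer', '7mer', '6mer']
--     best = None  # (priority index, file, marker); lower index wins, first file at an index is kept
--     for f in kmer_files:
--         for idx, m in enumerate(markers):
--             if m in f:
--                 if best is None or idx < best[0]:
--                     best = (idx, f, m)
--                 break
--     if best is not None:
--         return best[1], best[2]
-- ===== Notes on version B (the rewrite author's own statement) =====
-- stated objective: simpler
-- what changed: One pass over the files keeping a running best (priority-index, file, marker) with strict-improvement updates, instead of four sequential full scans, one per marker.
import Mathlib
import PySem

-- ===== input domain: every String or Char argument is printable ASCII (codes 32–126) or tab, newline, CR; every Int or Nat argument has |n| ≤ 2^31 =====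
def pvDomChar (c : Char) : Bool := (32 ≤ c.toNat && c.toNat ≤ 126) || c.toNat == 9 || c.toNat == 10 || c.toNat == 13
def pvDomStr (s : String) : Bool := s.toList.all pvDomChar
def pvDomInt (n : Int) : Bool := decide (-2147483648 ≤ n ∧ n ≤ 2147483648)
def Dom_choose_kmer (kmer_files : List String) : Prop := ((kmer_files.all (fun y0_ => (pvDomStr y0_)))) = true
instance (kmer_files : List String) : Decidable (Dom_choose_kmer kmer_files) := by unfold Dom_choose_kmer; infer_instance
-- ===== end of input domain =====

-- B replaces A's four sequential marker scans by one pass with a running best; objective: simpler.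

-- ===== PORT A =====
-- each of A's four 'for … if m in x: return x, m' loops, as structural recursion
def pvScan (m : String) : List String → Option (String × String)
  | [] => none
  | x :: xs => if PySem.Str.isIn m x then some (x, m) else pvScan m xs

def choose_kmer (kmer_files : List String) : Option (String × String) :=
  match pvScan "9mer" kmer_files with
  | some r => some r
  | none =>
    match pvScan "8mer" kmer_files with
    | some r => some r
    | none =>
      match pvScan "7mer" kmer_files with
      | some r => some r
      | none =>
        match pvScan "6mer" kmer_files with
        | some r => some r
        | none => none

-- ===== PORT B =====
def pvMarkers : List String := ["9mer", "8mer", "7mer", "6mer"]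

-- Source B's loop body: find the first (highest-priority) marker contained in f (the inner
-- 'for idx, m in enumerate(markers): if m in f: …; break'), update best on strictly smaller index
def pvBestStep (best : Option (Int × String × String)) (f : String) : Option (Int × String × String) :=
  match (PySem.List.enumerate pvMarkers 0).find? (fun p => PySem.Str.isIn p.2 f) with
  | none => best
  | some (idx, m) =>
    match best with
    | none => some (idx, f, m)
    | some (bidx, bf, bm) => if idx < bidx then some (idx, f, m) else some (bidx, bf, bm)

def choose_kmer_alt (kmer_files : List String) : Option (String × String) :=
  match kmer_files.foldl pvBestStep none with
  | none => none
  | some (_, f, m) => some (f, m)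

-- ===== PRECONDITION & SPEC =====
def Spec_choose_kmer (kmer_files : List String) (out : Option (String × String)) : Prop := out = choose_kmer_alt kmer_files
instance (kmer_files : List String) (out : Option (String × String)) : Decidable (Spec_choose_kmer kmer_files out) := by unfold Spec_choose_kmer; infer_instance

-- ===== CLAIM (what is proved, stated in full; the proofs are below) =====
def Claim_equal_choose_kmer : Prop := ∀ (kmer_files : List String), Dom_choose_kmer kmer_files → Spec_choose_kmer kmer_files (choose_kmer kmer_files)

-- ===== LEMMAS AND PROOFS =====

-- one-step unfolding of A's loop
theorem pvScan_cons (m x : String) (xs : List String) :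
    pvScan m (x :: xs) = if PySem.Str.isIn m x then some (x, m) else pvScan m xs := rfl

-- left-biased minimum-by-index merge of two candidates
def pvMerge (a b : Option (Int × String × String)) : Option (Int × String × String) :=
  match a, b with
  | none, b => b
  | some a, none => some a
  | some a, some b => if a.1 ≤ b.1 then some a else some b

-- the candidate a single file contributes
def pvCand (f : String) : Option (Int × String × String) :=
  ((PySem.List.enumerate pvMarkers 0).find? (fun p => PySem.Str.isIn p.2 f)).map
    (fun p => (p.1, f, p.2))

-- A's result annotated with the priority index
def pvAcore (kmer_files : List String) : Option (Int × String × String) :=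
  match pvScan "9mer" kmer_files with
  | some (f, m) => some (0, f, m)
  | none =>
    match pvScan "8mer" kmer_files with
    | some (f, m) => some (1, f, m)
    | none =>
      match pvScan "7mer" kmer_files with
      | some (f, m) => some (2, f, m)
      | none =>
        match pvScan "6mer" kmer_files with
        | some (f, m) => some (3, f, m)
        | none => none

def pvOut (a : Option (Int × String × String)) : Option (String × String) :=
  match a with
  | none => none
  | some (_, f, m) => some (f, m)

theorem pvStep_eq (b : Option (Int × String × String)) (f : String) :
    pvBestStep b f = pvMerge b (pvCand f) := by
  unfold pvBestStep pvCand
  rcases h : (PySem.List.enumerate pvMarkers 0).find? (fun p => PySem.Str.isIn p.2 f) with _ | ⟨i, m⟩ <;>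
    rw [h] <;> rcases b with _ | ⟨j, g, n⟩ <;>
    simp only [Option.map_none, Option.map_some, pvMerge] <;>
    split_ifs <;> first | rfl | omega

theorem pvMerge_assoc (a b c : Option (Int × String × String)) :
    pvMerge (pvMerge a b) c = pvMerge a (pvMerge b c) := by
  rcases a with _ | a <;> rcases b with _ | b <;> rcases c with _ | c <;>
    simp only [pvMerge] <;> split_ifs <;>
    simp only [pvMerge] <;> split_ifs <;> first | rfl | omega

theorem pvFoldl_merge (xs : List String) : ∀ b : Option (Int × String × String),
    xs.foldl pvBestStep b = pvMerge b (xs.foldl pvBestStep none) := by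
  induction xs with
  | nil => intro b; rcases b with _ | b <;> rfl
  | cons x xs ih =>
    intro b
    simp only [List.foldl_cons]
    rw [ih (pvBestStep b x), ih (pvBestStep none x), pvStep_eq b x, pvStep_eq none x]
    have hn : pvMerge none (pvCand x) = pvCand x := by rcases pvCand x with _ | c <;> rfl
    rw [hn, pvMerge_assoc]

set_option maxHeartbeats 2000000 in
theorem pvAcore_cons (x : String) (xs : List String) :
    pvAcore (x :: xs) = pvMerge (pvCand x) (pvAcore xs) := by
  by_cases h9 : PySem.Str.isIn "9mer" x <;> by_cases h8 : PySem.Str.isIn "8mer" x <;>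
    by_cases h7 : PySem.Str.isIn "7mer" x <;> by_cases h6 : PySem.Str.isIn "6mer" x <;>
    rcases t9 : pvScan "9mer" xs with _ | ⟨f9, m9⟩ <;>
    rcases t8 : pvScan "8mer" xs with _ | ⟨f8, m8⟩ <;>
    rcases t7 : pvScan "7mer" xs with _ | ⟨f7, m7⟩ <;>
    rcases t6 : pvScan "6mer" xs with _ | ⟨f6, m6⟩ <;>
    simp_all [pvAcore, pvScan_cons, pvCand, pvMerge, pvMarkers, PySem.List.enumerate]

theorem pvB_eq_Acore (xs : List String) : xs.foldl pvBestStep none = pvAcore xs := by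
  induction xs with
  | nil => rfl
  | cons x xs ih =>
    simp only [List.foldl_cons]
    rw [pvFoldl_merge, ih, pvStep_eq, pvAcore_cons]
    rcases pvCand x with _ | c <;> rfl

theorem pvA_eq_out (xs : List String) : choose_kmer xs = pvOut (pvAcore xs) := by
  unfold choose_kmer pvAcore
  rcases t9 : pvScan "9mer" xs with _ | ⟨f9, m9⟩ <;>
    rcases t8 : pvScan "8mer" xs with _ | ⟨f8, m8⟩ <;>
    rcases t7 : pvScan "7mer" xs with _ | ⟨f7, m7⟩ <;>
    rcases t6 : pvScan "6mer" xs with _ | ⟨f6, m6⟩ <;> rfl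

-- ===== VERDICT (by name: the statement is the Claim_ definition above) =====
theorem choose_kmer_spec : Claim_equal_choose_kmer := by
  intro xs _
  unfold Spec_choose_kmer choose_kmer_alt
  rw [pvB_eq_Acore, pvA_eq_out]
  rcases pvAcore xs with _ | ⟨i, f, m⟩ <;> rfl
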